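-- pv_equiv track=rewrite | github.com/papermerge/papermerge-core | papermerge/core/lib/utils.py | get_reordered_list
-- ===== SOURCE A (Python) =====
-- def get_reordered_list(pages_data, page_count):
--     """
--     Returns a list of integers. Each number in the list
--     is correctly positioned (newly ordered) page.
--     Examples:
--     If in document with 4 pages first and second pages were
--     swapped, then returned list will be:
--         [2, 1, 3, 4]
--     If first page was swapped with last one (also 4 paegs document)
--     result list will look like:
--         [4, 2, 3, 1]
--     """
--     results = []
--     page_map = {number: number for number in range(1, page_count + 1)}
--
--     for item in pages_data:
--         k = int(item['old_number'])
--         v = int(item['new_number'])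
--         page_map[k] = v
--
--     for number in range(1, page_count + 1):
--         results.append(
--             page_map[number]
--         )
--
--     return results
-- ===== SOURCE B (Python) =====
-- def get_reordered_list(pages_data, page_count):
--     # Output-driven: for each target position, the last override wins,
--     # so scan pages_data from the end for the first matching old_number.
--     rev = list(reversed(pages_data))
--
--     def final_number(n):
--         for item in rev:
--             if int(item['old_number']) == n:
--                 return int(item['new_number'])
--         return n
--
--     return [final_number(n) for n in range(1, page_count + 1)]
-- ===== Notes on version B (the rewrite author's own statement) =====
-- stated objective: alternative
-- what changed: Replaces A's identity dict mutated by overrides and read back out with an output-driven per-position search: for each page number it scans the reversed pages_data for the last matching override (last write wins) and falls back to the identity, maintaining no mutable map or list at all.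
import Mathlib
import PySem

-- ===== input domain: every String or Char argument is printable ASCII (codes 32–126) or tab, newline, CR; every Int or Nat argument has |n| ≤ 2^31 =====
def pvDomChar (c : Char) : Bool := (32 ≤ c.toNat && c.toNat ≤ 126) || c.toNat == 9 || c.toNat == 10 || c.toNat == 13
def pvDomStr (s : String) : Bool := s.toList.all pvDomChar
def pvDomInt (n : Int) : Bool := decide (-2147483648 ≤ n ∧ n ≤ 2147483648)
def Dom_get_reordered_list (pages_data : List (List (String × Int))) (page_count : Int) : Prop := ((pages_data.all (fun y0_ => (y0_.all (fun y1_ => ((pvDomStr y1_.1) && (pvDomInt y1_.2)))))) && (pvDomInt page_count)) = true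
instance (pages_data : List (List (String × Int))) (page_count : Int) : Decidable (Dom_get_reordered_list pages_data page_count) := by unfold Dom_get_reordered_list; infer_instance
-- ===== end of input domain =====

-- B replaces A's mutable identity dict + read-out pass with an output-driven
-- per-position search over the reversed override list (objective: alternative).

-- ===== PORT A =====
-- A: build page_map = {n: n for n in range(1, page_count+1)}, overwrite with each item's
-- old_number -> new_number, then read the map back out over range(1, page_count+1).
def get_reordered_list (pages_data : List (List (String × Int))) (page_count : Int) : List Int :=
  let page_map : PySem.Dict Int Int :=
    (PySem.List.pyRange 1 (page_count + 1) 1).foldl (fun d n => d.insert n n) PySem.Dict.empty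
  let page_map :=
    pages_data.foldl (fun d item =>
      let k := ((PySem.Dict.ofList item).get? "old_number").getD 0   -- item['old_number']; Pre_ guarantees the key is present
      let v := ((PySem.Dict.ofList item).get? "new_number").getD 0   -- item['new_number']; Pre_ guarantees the key is present
      d.insert k v) page_map
  (PySem.List.pyRange 1 (page_count + 1) 1).map (fun n => page_map.getD n 0)

-- ===== PORT B =====
-- B: rev = reversed(pages_data); for each n in range(1, page_count+1) return the
-- new_number of the first item of rev whose old_number is n, else n itself.
def get_reordered_list_alt (pages_data : List (List (String × Int))) (page_count : Int) : List Int :=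
  let rev := pages_data.reverse
  (PySem.List.pyRange 1 (page_count + 1) 1).map (fun n =>
    match rev.find? (fun item => ((PySem.Dict.ofList item).get? "old_number").getD 0 == n) with
    | some item => ((PySem.Dict.ofList item).get? "new_number").getD 0
    | none => n)

-- ===== PRECONDITION & SPEC =====
-- Pre_ excludes only inputs where A raises KeyError: every item must carry both keys.
def Pre_get_reordered_list (pages_data : List (List (String × Int))) (page_count : Int) : Prop :=
  ∀ item ∈ pages_data, "old_number" ∈ item.map Prod.fst ∧ "new_number" ∈ item.map Prod.fst
instance (pages_data : List (List (String × Int))) (page_count : Int) : Decidable (Pre_get_reordered_list pages_data page_count) := by unfold Pre_get_reordered_list; infer_instance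

def pvWitness_get_reordered_list : (List (List (String × Int))) × Int :=
  ([[("old_number", 1), ("new_number", 2)], [("old_number", 2), ("new_number", 1)]], 4)

def Spec_get_reordered_list (pages_data : List (List (String × Int))) (page_count : Int) (out : List Int) : Prop := out = get_reordered_list_alt pages_data page_count
instance (pages_data : List (List (String × Int))) (page_count : Int) (out : List Int) : Decidable (Spec_get_reordered_list pages_data page_count out) := by unfold Spec_get_reordered_list; infer_instance

-- ===== CLAIM (what is proved, stated in full; the proofs are below) =====
def Claim_equal_get_reordered_list : Prop := ∀ (pages_data : List (List (String × Int))) (page_count : Int), Dom_get_reordered_list pages_data page_count → Pre_get_reordered_list pages_data page_count → Spec_get_reordered_list pages_data page_count (get_reordered_list pages_data page_count)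

-- ===== LEMMAS AND PROOFS =====

-- Folding identity inserts: lookup is the identity on the inserted keys.
lemma getD_foldl_insert_id (xs : List Int) (d : PySem.Dict Int Int) (n : Int) :
    (xs.foldl (fun d m => d.insert m m) d).getD n 0
      = if n ∈ xs then n else d.getD n 0 := by
  induction xs generalizing d with
  | nil => simp
  | cons x rest ih =>
      simp only [List.foldl_cons, ih, PySem.Dict.getD_insert, List.mem_cons]
      by_cases hx : n = x <;> by_cases hr : n ∈ rest <;> simp [hx, hr]

-- A's override fold, read at one key, is B's first-match search over the reversed list
-- (the LAST override of a key is the one that survives the fold).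
lemma getD_override_fold (pd : List (List (String × Int))) (d : PySem.Dict Int Int) (n : Int) :
    (pd.foldl (fun d item =>
        let k := ((PySem.Dict.ofList item).get? "old_number").getD 0
        let v := ((PySem.Dict.ofList item).get? "new_number").getD 0
        d.insert k v) d).getD n 0
      = match pd.reverse.find? (fun item => ((PySem.Dict.ofList item).get? "old_number").getD 0 == n) with
        | some item => ((PySem.Dict.ofList item).get? "new_number").getD 0
        | none => d.getD n 0 := by
  induction pd using List.reverseRecOn with
  | nil => simp
  | append_singleton xs x ih =>
      rw [List.foldl_append, List.reverse_append]
      simp only [List.foldl_cons, List.foldl_nil, List.reverse_singleton,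
        List.singleton_append, List.find?_cons]
      rw [PySem.Dict.getD_insert]
      by_cases hx : ((PySem.Dict.ofList x).get? "old_number").getD 0 = n
      · simp [hx]
      · have hb : (((PySem.Dict.ofList x).get? "old_number").getD 0 == n) = false := by
          simp [hx]
        have hne : ¬ n = ((PySem.Dict.ofList x).get? "old_number").getD 0 := fun h => hx h.symm
        simp only [hb, if_neg hne, ih]

-- ===== VERDICT (by name: the statement is the Claim_ definition above) =====
theorem get_reordered_list_spec : Claim_equal_get_reordered_list := by
  intro pages_data page_count _ _
  show get_reordered_list pages_data page_count = get_reordered_list_alt pages_data page_count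
  unfold get_reordered_list get_reordered_list_alt
  apply List.map_congr_left
  intro n hn
  rw [getD_override_fold]
  cases h : pages_data.reverse.find? (fun item => ((PySem.Dict.ofList item).get? "old_number").getD 0 == n) with
  | some item => simp
  | none => simp [getD_foldl_insert_id, hn]
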